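-- pv_equiv track=rewrite | github.com/kornel45/crypto | lab4/main.py | gen_puzzle
-- ===== SOURCE A (Python) =====
-- def gen_puzzle(a, p, n):
--     puzzle_list = []
--     n = 2 ** n
--     start = n
--     stop = start - n
--     for x in range(start, stop, -1):
--         # a ^ x mod p = b
--         b1 = pow(a, x, p)
--         puzzle1 = [x, b1]
--         puzzle_list.append(puzzle1)
--     return puzzle_list
-- ===== SOURCE B (Python) =====
-- def gen_puzzle(a, p, n):
--     total = 2 ** n
--     b = 1
--     puzzle_list = []
--     for x in range(1, total + 1):
--         b = b * a % p
--         puzzle_list.append([x, b])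
--     puzzle_list.reverse()
--     return puzzle_list
-- ===== Notes on version B (the rewrite author's own statement) =====
-- stated objective: alternative
-- what changed: Instead of calling modular exponentiation pow(a,x,p) independently for each x counting down from 2**n, B maintains one running product b = b*a % p over an ascending loop and reverses the collected list once at the end.
import Mathlib
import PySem

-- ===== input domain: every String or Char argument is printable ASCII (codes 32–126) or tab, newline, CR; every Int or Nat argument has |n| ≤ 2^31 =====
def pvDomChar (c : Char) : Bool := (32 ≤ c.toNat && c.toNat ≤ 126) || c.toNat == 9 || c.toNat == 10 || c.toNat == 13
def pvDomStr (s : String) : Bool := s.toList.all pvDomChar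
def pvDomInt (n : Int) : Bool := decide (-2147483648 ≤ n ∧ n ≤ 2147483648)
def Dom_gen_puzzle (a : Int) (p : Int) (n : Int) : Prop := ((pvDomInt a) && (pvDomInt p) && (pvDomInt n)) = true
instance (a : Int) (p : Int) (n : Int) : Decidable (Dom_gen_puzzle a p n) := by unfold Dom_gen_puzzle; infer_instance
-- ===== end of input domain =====

-- B replaces per-element modular exponentiation by one running product b = b*a % p over an ascending loop, reversed once at the end.

-- ===== PORT A =====
def gen_puzzle (a : Int) (p : Int) (n : Int) : List (List Int) :=
  -- 'n = 2 ** n': exact for 0 ≤ n (Pre_); for n < 0 Python's 2**n is a float and range raises TypeError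
  let n2 : Int := 2 ^ n.toNat
  let start := n2
  let stop := start - n2
  (PySem.List.pyRange start stop (-1)).foldl
    (fun acc x => acc ++ [[x, PySem.Int.powMod a x.toNat p]]) []
  -- pow(a, x, p) = PySem.Int.powMod; every x in the range is positive, so x.toNat is exact; p ≠ 0 in Pre_

-- ===== PORT B =====
def gen_puzzle_alt (a : Int) (p : Int) (n : Int) : List (List Int) :=
  let total : Int := 2 ^ n.toNat
  let st := (PySem.List.pyRange 1 (total + 1) 1).foldl
    (fun (st : Int × List (List Int)) x =>
      let b := PySem.Int.mod (st.1 * a) p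
      (b, st.2 ++ [[x, b]])) ((1 : Int), ([] : List (List Int)))
  st.2.reverse

-- ===== PRECONDITION & SPEC =====
-- Pre_ excludes exactly the inputs where Python A raises: n < 0 (2**n is a float, range raises
-- TypeError) and p = 0 (pow raises ValueError).  B raises on the same inputs.
def Pre_gen_puzzle (a : Int) (p : Int) (n : Int) : Prop := 0 ≤ n ∧ p ≠ 0
instance (a : Int) (p : Int) (n : Int) : Decidable (Pre_gen_puzzle a p n) := by unfold Pre_gen_puzzle; infer_instance
def pvWitness_gen_puzzle : Int × Int × Int := (3, 7, 4)

def Spec_gen_puzzle (a : Int) (p : Int) (n : Int) (out : List (List Int)) : Prop := out = gen_puzzle_alt a p n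
instance (a : Int) (p : Int) (n : Int) (out : List (List Int)) : Decidable (Spec_gen_puzzle a p n out) := by unfold Spec_gen_puzzle; infer_instance

-- ===== CLAIM (what is proved, stated in full; the proofs are below) =====
def Claim_equal_gen_puzzle : Prop := ∀ (a : Int) (p : Int) (n : Int), Dom_gen_puzzle a p n → Pre_gen_puzzle a p n → Spec_gen_puzzle a p n (gen_puzzle a p n)

-- ===== LEMMAS AND PROOFS =====

-- flatten of singleton blocks (specific shape of A's append-fold after the library rewrite)
theorem pv_flatten_singleton (f : Int → List Int) (l : List Int) :
    (List.map (fun x => [f x]) l).flatten = List.map f l := by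
  induction l with
  | nil => rfl
  | cons y ys ih => simp [ih]

-- Python's % respects congruence in the left factor (any modulus)
theorem pv_mulmod (u v p : Int) :
    PySem.Int.mod (PySem.Int.mod u p * v) p = PySem.Int.mod (u * v) p := by
  simp only [PySem.Int.mod]
  have h : u.fmod p * v = u * v - p * (u.fdiv p * v) := by
    rw [Int.fmod_def]; ring
  rw [h]
  exact Int.sub_mul_fmod_self_left (u * v) p (u.fdiv p * v)

-- invariant of B's loop over x = 1 .. m
theorem pv_loop (a p : Int) (m : Nat) :
    (PySem.List.pyRange 1 ((m : Int) + 1) 1).foldl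
      (fun (st : Int × List (List Int)) x =>
        let b := PySem.Int.mod (st.1 * a) p
        (b, st.2 ++ [[x, b]])) ((1 : Int), ([] : List (List Int)))
    = ((if m = 0 then 1 else PySem.Int.mod (a ^ m) p),
       (PySem.List.pyRange 1 ((m : Int) + 1) 1).map
         (fun x => [x, PySem.Int.powMod a x.toNat p])) := by
  induction m with
  | zero =>
    simp [PySem.List.pyRange_one_eq_nil (le_refl (1 : Int))]
  | succ k ih =>
    have hcast : ((k + 1 : Nat) : Int) + 1 = ((k : Int) + 1) + 1 := by push_cast; ring
    have hsplit := PySem.List.pyRange_one_succ_right (a := 1) (b := (k : Int) + 1)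
      (by omega)
    rw [hcast, hsplit, List.foldl_append, List.map_append, ih]
    have htn : (((k : Int) + 1)).toNat = k + 1 := by omega
    have hpow : PySem.Int.powMod a (((k : Int) + 1)).toNat p
        = PySem.Int.mod (a ^ (k + 1)) p := by
      rw [htn]; rfl
    cases k with
    | zero => simp [PySem.Int.powMod, PySem.Int.mod]
    | succ j =>
      have ht2 : ((j : Int) + 1 + 1).toNat = j + 2 := by omega
      simp only [List.foldl_cons, List.foldl_nil, List.map_cons, List.map_nil,
        Nat.succ_ne_zero, ite_false]
      refine Prod.ext ?_ ?_
      · simp only [pv_mulmod, ← pow_succ]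
      · simp [PySem.Int.powMod, ht2, pv_mulmod, ← pow_succ]

-- ===== VERDICT (by name: the statement is the Claim_ definition above) =====
theorem gen_puzzle_spec : Claim_equal_gen_puzzle := by
  intro a p n _ _
  unfold Spec_gen_puzzle gen_puzzle gen_puzzle_alt
  dsimp only
  have hzero : (2 : Int) ^ n.toNat - 2 ^ n.toNat = 0 := by ring
  rw [hzero, PySem.List.pyRange_neg_one_eq_reverse]
  norm_num
  have hN : (2 : Int) ^ n.toNat = ((2 ^ n.toNat : Nat) : Int) := by push_cast; ring
  rw [hN, pv_loop a p (2 ^ n.toNat)]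
  simp [← List.map_reverse, pv_flatten_singleton]
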